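-- pv_equiv track=rewrite | github.com/maxinebadiola/CSALGCM | neverFade.py | solve
-- ===== SOURCE A (Python) =====
-- def payoutGoal(x, n, g, y, jobs, midpoint):
--     totalPayout = 0
--     for i in range(n):
--         difficulty, payout = jobs[i]
--         difficulty, payout = jobs[i]
--         # x (skill) > difficulty
--         # x (skill) = difficulty, payout >= y
--         # x (skill) < difficulty, payout >= y^2
--         if x + midpoint > difficulty or (x + midpoint == difficulty and payout >= y) or (x + midpoint < difficulty and payout >= y**2):
--             totalPayout += payout
--     return totalPayout >= g
--
-- def solve(x, n, g, y, jobs):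
--     minSkill = 0 #min skill needed
--     maxSkill = 10**9 #max skill 10^9
--     result = -1
--     jobs.sort(key=lambda job: (-job[1], job[0]))
--
--     while minSkill <= maxSkill:
--         midpoint = (minSkill + maxSkill) // 2
--         #find minimum skill needed for payout
--         if payoutGoal(x, n, g, y, jobs, midpoint):
--             result = midpoint
--             maxSkill = midpoint - 1
--         else:
--             minSkill = midpoint + 1
--
--     return result
-- ===== SOURCE B (Python) =====
-- def solve(x, n, g, y, jobs):
--     # Same in-place sort as A (observable side effect on the caller's list).
--     jobs.sort(key=lambda job: (-job[1], job[0]))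
--
--     # For skill increments m >= 0 a job (d, p) counts towards the payout
--     # exactly when m >= t, with a per-job threshold t computed once:
--     #   p >= y*y : always counted            -> t = 0
--     #   y <= p < y*y : counted when x+m >= d -> t = d - x
--     #   p < y    : counted when x+m > d      -> t = d - x + 1
--     pairs = []
--     for i in range(n):
--         d, p = jobs[i]
--         if p >= y * y:
--             t = 0
--         elif p >= y:
--             t = d - x
--         else:
--             t = d - x + 1
--         pairs.append((t, p))
--     pairs.sort(key=lambda tp: tp[0])
--     thresholds = [t for t, _ in pairs]
--     prefix = [0]
--     for _, p in pairs:
--         prefix.append(prefix[-1] + p)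
--
--     def payout_at(m):
--         # total payout at increment m = prefix sum up to bisect_right(thresholds, m)
--         lo, hi = 0, len(thresholds)
--         while lo < hi:
--             mid = (lo + hi) // 2
--             if thresholds[mid] <= m:
--                 lo = mid + 1
--             else:
--                 hi = mid
--         return prefix[lo]
--
--     result = -1
--     lo, hi = 0, 10**9
--     while lo <= hi:
--         mid = (lo + hi) // 2
--         if payout_at(mid) >= g:
--             result = mid
--             hi = mid - 1
--         else:
--             lo = mid + 1
--     return result
-- ===== Notes on version B (the rewrite author's own statement) =====
-- stated objective: faster
-- what changed: B precomputes a per-job activation threshold, sorts thresholds with prefix sums, and answers each bisection probe by a binary search over the thresholds (O(log n)) instead of A's O(n) rescan of all jobs per probe; the same outer bisection over [0,10^9] (and the same in-place jobs.sort) is kept so the result is exactly A's even where the payout predicate is non-monotone (negative payouts).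
import Mathlib
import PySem

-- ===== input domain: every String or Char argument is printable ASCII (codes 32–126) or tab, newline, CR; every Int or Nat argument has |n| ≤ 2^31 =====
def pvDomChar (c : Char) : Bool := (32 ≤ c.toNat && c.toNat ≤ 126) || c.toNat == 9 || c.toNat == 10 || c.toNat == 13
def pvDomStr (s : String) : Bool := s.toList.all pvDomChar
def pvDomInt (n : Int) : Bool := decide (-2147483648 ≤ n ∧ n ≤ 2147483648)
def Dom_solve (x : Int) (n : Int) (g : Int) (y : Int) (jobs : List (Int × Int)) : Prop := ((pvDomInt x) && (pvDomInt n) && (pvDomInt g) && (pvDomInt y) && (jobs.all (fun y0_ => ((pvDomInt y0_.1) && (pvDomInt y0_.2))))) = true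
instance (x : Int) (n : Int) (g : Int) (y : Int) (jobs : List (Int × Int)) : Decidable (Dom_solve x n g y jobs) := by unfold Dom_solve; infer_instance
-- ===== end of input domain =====

-- B keeps A's outer bisection over [0,10^9] (and the same in-place sort of jobs, performed identically
-- by both) but answers each probe from sorted per-job thresholds with prefix sums via an inner binary
-- search instead of rescanning all jobs.


-- ===== PORT A =====
-- payoutGoal: the per-midpoint scan over jobs[0..n-1]; jobs[i] is pyGetD (IndexError, i.e. n > len jobs, is excluded by Pre_solve)
def payoutGoal (x : Int) (n : Int) (g : Int) (y : Int) (jobs : List (Int × Int)) (midpoint : Int) : Bool :=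
  let total := (PySem.List.pyRange 0 n 1).foldl (fun totalPayout i =>
    let job := PySem.List.pyGetD jobs i (0, 0)
    if x + midpoint > job.1 ∨ (x + midpoint = job.1 ∧ job.2 ≥ y) ∨ (x + midpoint < job.1 ∧ job.2 ≥ y ^ 2)
    then totalPayout + job.2 else totalPayout) 0
  decide (total ≥ g)

-- the while-loop of A's solve
def solveLoop (x : Int) (n : Int) (g : Int) (y : Int) (jobs : List (Int × Int))
    (minSkill maxSkill result : Int) : Int :=
  if h : minSkill ≤ maxSkill then
    let midpoint := PySem.Int.floordiv (minSkill + maxSkill) 2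
    if payoutGoal x n g y jobs midpoint
    then solveLoop x n g y jobs minSkill (midpoint - 1) midpoint
    else solveLoop x n g y jobs (midpoint + 1) maxSkill result
  else result
termination_by (maxSkill + 1 - minSkill).toNat
decreasing_by
  · have := PySem.Int.floordiv_two_mid_bounds h; omega
  · have := PySem.Int.floordiv_two_mid_bounds h; omega

def solve (x : Int) (n : Int) (g : Int) (y : Int) (jobs : List (Int × Int)) : Int :=
  let jobsSorted := PySem.List.sorted2 jobs (fun job => -job.2) (fun job => job.1)
  solveLoop x n g y jobsSorted 0 (10 ^ 9) (-1)

-- ===== PORT B =====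
-- build the (threshold, payout) pairs: the `for i in range(n)` loop of Source B
def altPairs (x : Int) (n : Int) (y : Int) (jobs : List (Int × Int)) : List (Int × Int) :=
  (PySem.List.pyRange 0 n 1).foldl (fun pairs i =>
    let job := PySem.List.pyGetD jobs i (0, 0)
    let t := if job.2 ≥ y * y then 0 else if job.2 ≥ y then job.1 - x else job.1 - x + 1
    pairs ++ [(t, job.2)]) []

-- the hand-written bisect_right loop of payout_at
def bisectLoop (thresholds : List Int) (m : Int) (lo hi : Int) : Int :=
  if h : lo < hi then
    let mid := PySem.Int.floordiv (lo + hi) 2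
    if PySem.List.pyGetD thresholds mid 0 ≤ m
    then bisectLoop thresholds m (mid + 1) hi
    else bisectLoop thresholds m lo mid
  else lo
termination_by (hi - lo).toNat
decreasing_by
  · have h1 := PySem.Int.floordiv_two_mid_bounds (le_of_lt h)
    have h2 := (PySem.Int.floordiv_lt_iff_lt_mul (a := lo + hi) (b := 2) (q := hi) (by omega)).mpr (by omega)
    omega
  · have h1 := PySem.Int.floordiv_two_mid_bounds (le_of_lt h)
    have h2 := (PySem.Int.floordiv_lt_iff_lt_mul (a := lo + hi) (b := 2) (q := hi) (by omega)).mpr (by omega)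
    omega

def payoutAt (thresholds pref : List Int) (m : Int) : Int :=
  PySem.List.pyGetD pref (bisectLoop thresholds m 0 (thresholds.length : Int)) 0

-- the outer while-loop of Source B
def altLoop (g : Int) (thresholds pref : List Int) (lo hi result : Int) : Int :=
  if h : lo ≤ hi then
    let mid := PySem.Int.floordiv (lo + hi) 2
    if payoutAt thresholds pref mid ≥ g
    then altLoop g thresholds pref lo (mid - 1) mid
    else altLoop g thresholds pref (mid + 1) hi result
  else result
termination_by (hi + 1 - lo).toNat
decreasing_by
  · have := PySem.Int.floordiv_two_mid_bounds h; omega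
  · have := PySem.Int.floordiv_two_mid_bounds h; omega

def solve_alt (x : Int) (n : Int) (g : Int) (y : Int) (jobs : List (Int × Int)) : Int :=
  let jobsSorted := PySem.List.sorted2 jobs (fun job => -job.2) (fun job => job.1)
  let pairs := altPairs x n y jobsSorted
  let pairsS := PySem.List.sorted pairs (fun tp => tp.1) false
  let thresholds := pairsS.map (fun tp => tp.1)
  let pref := pairsS.foldl (fun pre tp => pre ++ [PySem.List.pyGetD pre (-1) 0 + tp.2]) [0]
  altLoop g thresholds pref 0 (10 ^ 9) (-1)

-- ===== PRECONDITION & SPEC =====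
-- Pre_solve excludes exactly the inputs where the Python A raises (IndexError: jobs[i] with n > len(jobs)); B raises there too.
def Pre_solve (x : Int) (n : Int) (g : Int) (y : Int) (jobs : List (Int × Int)) : Prop :=
  n ≤ (jobs.length : Int)
instance (x : Int) (n : Int) (g : Int) (y : Int) (jobs : List (Int × Int)) : Decidable (Pre_solve x n g y jobs) := by unfold Pre_solve; infer_instance

def pvWitness_solve : Int × Int × Int × Int × (List (Int × Int)) := (1, 1, 1, 1, [(0, 2)])

def Spec_solve (x : Int) (n : Int) (g : Int) (y : Int) (jobs : List (Int × Int)) (out : Int) : Prop := out = solve_alt x n g y jobs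
instance (x : Int) (n : Int) (g : Int) (y : Int) (jobs : List (Int × Int)) (out : Int) : Decidable (Spec_solve x n g y jobs out) := by unfold Spec_solve; infer_instance

-- ===== CLAIM (what is proved, stated in full; the proofs are below) =====
def Claim_equal_solve : Prop := ∀ (x : Int) (n : Int) (g : Int) (y : Int) (jobs : List (Int × Int)), Dom_solve x n g y jobs → Pre_solve x n g y jobs → Spec_solve x n g y jobs (solve x n g y jobs)

-- ===== LEMMAS AND PROOFS =====


-- pvThr: the per-job activation threshold of B (matches the `t` computed in altPairs)
def pvThr (x y : Int) (jp : Int × Int) : Int :=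
  if jp.2 ≥ y * y then 0 else if jp.2 ≥ y then jp.1 - x else jp.1 - x + 1

-- pvPsums s l: running partial sums of the payouts of l starting from s (models the prefix list)
def pvPsums : Int → List (Int × Int) → List Int
  | _, [] => []
  | s, tp :: t => (s + tp.2) :: pvPsums (s + tp.2) t

-- A's inclusion test holds at a nonnegative midpoint m iff the threshold is ≤ m
lemma pv_incl_iff (x y m : Int) (jp : Int × Int) (hm : 0 ≤ m) :
    (x + m > jp.1 ∨ (x + m = jp.1 ∧ jp.2 ≥ y) ∨ (x + m < jp.1 ∧ jp.2 ≥ y ^ 2))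
      ↔ pvThr x y jp ≤ m := by
  obtain ⟨d, p⟩ := jp
  have hy : y ≤ y * y := by nlinarith [sq_nonneg (y - 1)]
  simp only [pvThr, pow_two]
  split_ifs <;> constructor <;> (intro hc) <;> omega

-- a foldl over range(k) indexing l is a foldl over the first k elements of l
lemma pv_fold_range_take {β : Type} (l : List (Int × Int)) (f : β → (Int × Int) → β) :
    ∀ (k : Nat), k ≤ l.length → ∀ (init : β),
    (PySem.List.pyRange 0 (k : Int) 1).foldl (fun acc i => f acc (PySem.List.pyGetD l i (0, 0))) init
      = (l.take k).foldl f init := by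
  intro k
  induction k with
  | zero => intro _ init; simp [PySem.List.pyRange_one_eq_nil]
  | succ k ih =>
    intro hk init
    have hcast : ((k + 1 : Nat) : Int) = (k : Int) + 1 := by push_cast; ring
    rw [hcast, PySem.List.pyRange_one_succ_right (by positivity), List.foldl_append]
    have hklt : k < l.length := by omega
    rw [ih (by omega), List.take_add_one, List.foldl_append]
    simp [PySem.List.pyGetD_natCast, List.getD_eq_getElem?_getD, List.getElem?_eq_getElem hklt]

lemma pv_fold_range_take_int {β : Type} (l : List (Int × Int)) (f : β → (Int × Int) → β)
    (n : Int) (hn : n ≤ (l.length : Int)) (init : β) :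
    (PySem.List.pyRange 0 n 1).foldl (fun acc i => f acc (PySem.List.pyGetD l i (0, 0))) init
      = (l.take n.toNat).foldl f init := by
  by_cases h : n ≤ 0
  · rw [PySem.List.pyRange_one_eq_nil h]
    have : n.toNat = 0 := by omega
    simp [this]
  · have hcast : ((n.toNat : Nat) : Int) = n := by omega
    rw [← hcast]
    exact pv_fold_range_take l f n.toNat (by omega) init

-- A's scan total = payout sum of the jobs whose threshold is ≤ m
lemma pv_total_eq (x y m : Int) (tk : List (Int × Int)) (hm : 0 ≤ m) :
    tk.foldl (fun totalPayout jp =>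
        if x + m > jp.1 ∨ (x + m = jp.1 ∧ jp.2 ≥ y) ∨ (x + m < jp.1 ∧ jp.2 ≥ y ^ 2)
        then totalPayout + jp.2 else totalPayout) 0
      = ((tk.filter (fun jp => decide (pvThr x y jp ≤ m))).map (fun jp => jp.2)).sum := by
  rw [List.sum_eq_foldl, List.foldl_map, List.foldl_filter]
  apply List.foldl_ext
  intro acc jp _
  simp only [decide_eq_true_eq]
  exact if_congr (pv_incl_iff x y m jp hm) rfl rfl

-- altPairs is the threshold/payout pairing of the first n jobs
lemma pv_pairs_eq (x y : Int) (n : Int) (l : List (Int × Int)) (hn : n ≤ (l.length : Int)) :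
    altPairs x n y l = (l.take n.toNat).map (fun jp => (pvThr x y jp, jp.2)) := by
  have h2 := PySem.List.foldl_append_singleton_eq_map (fun jp => (pvThr x y jp, jp.2)) (l.take n.toNat) ([] : List (Int × Int))
  have h1 := pv_fold_range_take_int l (fun pairs job => pairs ++ [(pvThr x y job, job.2)]) n hn []
  unfold altPairs
  exact h1.trans (by simpa using h2)

-- bisectLoop on a (≤-sorted) list returns a split point: everything before it is ≤ m, everything from it on is > m
lemma pv_bisect_spec (ths : List Int) (m : Int)
    (hsort : ∀ i j : Nat, i < ths.length → j < ths.length → i ≤ j → ths.getD i 0 ≤ ths.getD j 0) :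
    ∀ (meas : Nat) (lo hi : Int), (hi - lo).toNat = meas → 0 ≤ lo → lo ≤ hi → hi ≤ (ths.length : Int) →
    (∀ i : Nat, (i : Int) < lo → i < ths.length → ths.getD i 0 ≤ m) →
    (∀ i : Nat, hi ≤ (i : Int) → i < ths.length → m < ths.getD i 0) →
    0 ≤ bisectLoop ths m lo hi ∧ bisectLoop ths m lo hi ≤ (ths.length : Int) ∧
      (∀ i : Nat, (i : Int) < bisectLoop ths m lo hi → i < ths.length → ths.getD i 0 ≤ m) ∧
      (∀ i : Nat, bisectLoop ths m lo hi ≤ (i : Int) → i < ths.length → m < ths.getD i 0) := by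
  intro meas
  induction meas using Nat.strong_induction_on with
  | _ meas ih =>
    intro lo hi hmeas hlo0 hlohi hhilen hlow hhigh
    unfold bisectLoop
    by_cases h : lo < hi
    · rw [dif_pos h]
      simp only []
      have hmid := PySem.Int.floordiv_two_mid_bounds (le_of_lt h)
      have hmidhi := (PySem.Int.floordiv_lt_iff_lt_mul (a := lo + hi) (b := 2) (q := hi) (by omega)).mpr (by omega)
      set mid := PySem.Int.floordiv (lo + hi) 2 with hmiddef
      have hmidlen : mid < (ths.length : Int) := by omega
      have hmidnat : (mid.toNat : Int) = mid := by omega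
      have hget : PySem.List.pyGetD ths mid 0 = ths.getD mid.toNat 0 := by
        rw [PySem.List.pyGetD_eq_getElem ths 0 (by omega) (by omega),
            List.getD_eq_getElem ths 0 (by omega)]
      rw [hget]
      by_cases hle : ths.getD mid.toNat 0 ≤ m
      · rw [if_pos hle]
        refine ih (hi - (mid + 1)).toNat (by omega) (mid + 1) hi (rfl) (by omega) (by omega) hhilen ?_ hhigh
        intro i hilt hilen
        have hile : i ≤ mid.toNat := by omega
        exact le_trans (hsort i mid.toNat hilen (by omega) hile) hle
      · rw [if_neg hle]
        refine ih (mid - lo).toNat (by omega) lo mid (rfl) hlo0 (by omega) (by omega) hlow ?_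
        intro i hige hilen
        have := hsort mid.toNat i (by omega) hilen (by omega)
        omega
    · rw [dif_neg h]
      have : lo = hi := by omega
      exact ⟨hlo0, by omega, fun i hi1 hi2 => hlow i hi1 hi2, fun i hi1 hi2 => hhigh i (by omega) hi2⟩

-- the prefix-building foldl appends the running partial sums
lemma pv_pref_fold (l : List (Int × Int)) :
    ∀ (pre : List Int) (h : pre ≠ []),
    l.foldl (fun pre tp => pre ++ [PySem.List.pyGetD pre (-1) 0 + tp.2]) pre
      = pre ++ pvPsums (pre.getLast h) l := by
  induction l with
  | nil => intro pre h; simp [pvPsums]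
  | cons tp t ih =>
    intro pre h
    simp only [List.foldl_cons]
    rw [PySem.List.pyGetD_neg_one pre _ h]
    rw [ih (pre ++ [pre.getLast h + tp.2]) (by simp)]
    rw [List.getLast_concat]
    simp [pvPsums]

lemma pv_psums_length (l : List (Int × Int)) : ∀ s : Int, (pvPsums s l).length = l.length := by
  induction l with
  | nil => intro s; rfl
  | cons tp t ih => intro s; simp [pvPsums, ih]

-- indexing the prefix list gives the payout sum of the first c pairs
lemma pv_psums_getD (l : List (Int × Int)) :
    ∀ (s : Int) (c : Nat), c ≤ l.length →
    (s :: pvPsums s l).getD c 0 = s + ((l.take c).map (fun jp => jp.2)).sum := by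
  induction l with
  | nil =>
    intro s c hc
    have hc0 : c = 0 := by simpa using hc
    subst hc0; simp [pvPsums]
  | cons tp t ih =>
    intro s c hc
    cases c with
    | zero => simp
    | succ c =>
      have := ih (s + tp.2) c (by simpa using hc)
      simp only [pvPsums, List.getD_cons_succ] at this ⊢
      rw [this]
      simp [List.take_succ_cons]
      ring

-- on a list whose first c elements are exactly those with key ≤ m, filter = take
lemma pv_filter_eq_take (m : Int) :
    ∀ (l : List (Int × Int)) (c : Nat), c ≤ l.length →
    (∀ i : Nat, i < l.length → i < c → (l.getD i (0,0)).1 ≤ m) →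
    (∀ i : Nat, i < l.length → c ≤ i → m < (l.getD i (0,0)).1) →
    l.filter (fun tp => decide (tp.1 ≤ m)) = l.take c := by
  intro l
  induction l with
  | nil => intro c hc _ _; simp at hc; simp [hc]
  | cons tp t ih =>
    intro c hc hlow hhigh
    cases c with
    | zero =>
      rw [List.take_zero, List.filter_eq_nil_iff]
      intro a ha
      obtain ⟨i, hi, rfl⟩ := List.mem_iff_getElem.mp ha
      have := hhigh i (by simpa using hi) (by omega)
      simp only [List.getD_eq_getElem?_getD, List.getElem?_eq_getElem hi, Option.getD_some] at this
      simp only [decide_eq_true_eq]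
      omega
    | succ c =>
      have hhead : tp.1 ≤ m := by
        have := hlow 0 (by simp) (by omega)
        simpa using this
      simp only [List.take_succ_cons, List.filter_cons, decide_eq_true_eq, if_pos hhead]
      congr 1
      refine ih c (by simpa using hc) ?_ ?_
      · intro i hi hic
        have := hlow (i + 1) (by simpa using hi) (by omega)
        simpa using this
      · intro i hi hic
        have := hhigh (i + 1) (by simpa using hi) (by omega)
        simpa using this

-- the probe predicates of the two loops agree at every nonnegative midpoint
lemma pv_probe_eq (x n g y m : Int) (js : List (Int × Int)) (hn : n ≤ (js.length : Int)) (hm : 0 ≤ m) :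
    payoutGoal x n g y js m
      = decide (payoutAt ((PySem.List.sorted (altPairs x n y js) (fun tp => tp.1) false).map (fun tp => tp.1))
          ((PySem.List.sorted (altPairs x n y js) (fun tp => tp.1) false).foldl
            (fun pre tp => pre ++ [PySem.List.pyGetD pre (-1) 0 + tp.2]) [0]) m ≥ g) := by
  have hpairs : altPairs x n y js = (js.take n.toNat).map (fun jp => (pvThr x y jp, jp.2)) :=
    pv_pairs_eq x y n js hn
  set pairs := altPairs x n y js with hpairsdef
  set pairsS := PySem.List.sorted pairs (fun tp => tp.1) false with hpairsSdef
  set ths := pairsS.map (fun tp => tp.1) with hthsdef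
  have hperm : pairsS.Perm pairs := PySem.List.sorted_perm pairs (fun tp => tp.1) false
  have hpw : pairsS.Pairwise (fun a b => a.1 ≤ b.1) := PySem.List.sorted_pairwise pairs (fun tp => tp.1)
  have hlen : ths.length = pairsS.length := by simp [hthsdef]
  have hget : ∀ i : Nat, i < pairsS.length → ths.getD i 0 = (pairsS.getD i (0, 0)).1 := by
    intro i hi
    rw [List.getD_eq_getElem ths 0 (by omega), List.getD_eq_getElem pairsS (0,0) hi]
    simp [hthsdef]
  have hsort : ∀ i j : Nat, i < ths.length → j < ths.length → i ≤ j → ths.getD i 0 ≤ ths.getD j 0 := by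
    intro i j hi hj hij
    rcases Nat.eq_or_lt_of_le hij with rfl | hij
    · exact le_refl _
    · rw [hget i (by omega), hget j (by omega),
          List.getD_eq_getElem pairsS (0,0) (by omega), List.getD_eq_getElem pairsS (0,0) (by omega)]
      exact (List.pairwise_iff_getElem.mp hpw) i j (by omega) (by omega) hij
  obtain ⟨hr0, hrlen, hrlow, hrhigh⟩ :=
    pv_bisect_spec ths m hsort ths.length 0 (ths.length : Int) (by omega) (by omega) (by omega)
      (by omega) (by intro i h1 h2; omega) (by intro i h1 h2; omega)
  set r := bisectLoop ths m 0 ((ths.length : Nat) : Int) with hrdef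
  have hpref := pv_pref_fold pairsS [0] (by simp)
  have hpref' : pairsS.foldl (fun pre tp => pre ++ [PySem.List.pyGetD pre (-1) 0 + tp.2]) [0]
      = (0 : Int) :: pvPsums 0 pairsS := by
    rw [hpref]; rfl
  have hplen : ((0 : Int) :: pvPsums 0 pairsS).length = pairsS.length + 1 := by
    simp [pv_psums_length]
  have hgetr : PySem.List.pyGetD ((0 : Int) :: pvPsums 0 pairsS) r 0
      = ((0 : Int) :: pvPsums 0 pairsS).getD r.toNat 0 := by
    rw [PySem.List.pyGetD_eq_getElem _ 0 hr0 (by omega), List.getD_eq_getElem _ 0 (by omega)]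
  have hB : payoutAt ths (pairsS.foldl (fun pre tp => pre ++ [PySem.List.pyGetD pre (-1) 0 + tp.2]) [0]) m
      = ((pairsS.take r.toNat).map (fun tp => tp.2)).sum := by
    unfold payoutAt
    rw [hpref', hgetr, pv_psums_getD pairsS 0 r.toNat (by omega)]
    ring
  have hft : pairsS.filter (fun tp => decide (tp.1 ≤ m)) = pairsS.take r.toNat := by
    refine pv_filter_eq_take m pairsS r.toNat (by omega) ?_ ?_
    · intro i hilen hir
      have := hrlow i (by omega) (by omega)
      rw [hget i hilen] at this; exact this
    · intro i hilen hir
      have := hrhigh i (by omega) (by omega)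
      rw [hget i hilen] at this; exact this
  have hsum : ((pairsS.take r.toNat).map (fun tp => tp.2)).sum
      = (((js.take n.toNat).filter (fun jp => decide (pvThr x y jp ≤ m))).map (fun jp => jp.2)).sum := by
    rw [← hft]
    rw [List.Perm.sum_eq ((hperm.filter (fun tp => decide (tp.1 ≤ m))).map (fun tp => tp.2))]
    rw [hpairs, List.filter_map, List.map_map]
    rfl
  have htot : (PySem.List.pyRange 0 n 1).foldl (fun totalPayout i =>
        let job := PySem.List.pyGetD js i (0, 0)
        if x + m > job.1 ∨ (x + m = job.1 ∧ job.2 ≥ y) ∨ (x + m < job.1 ∧ job.2 ≥ y ^ 2)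
        then totalPayout + job.2 else totalPayout) 0
      = (((js.take n.toNat).filter (fun jp => decide (pvThr x y jp ≤ m))).map (fun jp => jp.2)).sum :=
    (pv_fold_range_take_int js (fun totalPayout job =>
        if x + m > job.1 ∨ (x + m = job.1 ∧ job.2 ≥ y) ∨ (x + m < job.1 ∧ job.2 ≥ y ^ 2)
        then totalPayout + job.2 else totalPayout) n hn 0).trans
      (pv_total_eq x y m (js.take n.toNat) hm)
  rw [hB, hsum]
  exact congrArg (fun z => decide (z ≥ g)) htot

-- the two bisection loops coincide once their probe predicates do
lemma pv_loops_eq (x n g y : Int) (js : List (Int × Int)) (hn : n ≤ (js.length : Int)) :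
    ∀ (meas : Nat) (lo hi res : Int), (hi + 1 - lo).toNat = meas → 0 ≤ lo →
    solveLoop x n g y js lo hi res
      = altLoop g ((PySem.List.sorted (altPairs x n y js) (fun tp => tp.1) false).map (fun tp => tp.1))
          ((PySem.List.sorted (altPairs x n y js) (fun tp => tp.1) false).foldl
            (fun pre tp => pre ++ [PySem.List.pyGetD pre (-1) 0 + tp.2]) [0]) lo hi res := by
  intro meas
  induction meas using Nat.strong_induction_on with
  | _ meas ih =>
    intro lo hi res hmeas hlo0
    unfold solveLoop altLoop
    by_cases h : lo ≤ hi
    · rw [dif_pos h, dif_pos h]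
      simp only []
      have hmid := PySem.Int.floordiv_two_mid_bounds h
      set mid := PySem.Int.floordiv (lo + hi) 2 with hmiddef
      rw [pv_probe_eq x n g y mid js hn (by omega)]
      by_cases hp : payoutAt ((PySem.List.sorted (altPairs x n y js) (fun tp => tp.1) false).map (fun tp => tp.1))
          ((PySem.List.sorted (altPairs x n y js) (fun tp => tp.1) false).foldl
            (fun pre tp => pre ++ [PySem.List.pyGetD pre (-1) 0 + tp.2]) [0]) mid ≥ g
      · rw [if_pos (by simpa using hp), if_pos hp]
        exact ih (mid - 1 + 1 - lo).toNat (by omega) lo (mid - 1) mid rfl hlo0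
      · rw [if_neg (by simpa using hp), if_neg hp]
        exact ih (hi + 1 - (mid + 1)).toNat (by omega) (mid + 1) hi res rfl (by omega)
    · rw [dif_neg h, dif_neg h]


-- ===== VERDICT (by name: the statement is the Claim_ definition above) =====
theorem solve_spec : Claim_equal_solve := by
  intro x n g y jobs _hdom hpre
  have hlen : ((PySem.List.sorted2 jobs (fun job => -job.2) (fun job => job.1)).length : Int) = (jobs.length : Int) := by
    exact_mod_cast congrArg Nat.cast (List.Perm.length_eq (PySem.List.sorted2_perm jobs (fun job => -job.2) (fun job => job.1) false))
  unfold Spec_solve solve solve_alt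
  simp only []
  exact pv_loops_eq x n g y (PySem.List.sorted2 jobs (fun job => -job.2) (fun job => job.1))
    (by rw [hlen]; exact hpre) ((10 ^ 9 + 1 - 0 : Int)).toNat 0 (10 ^ 9) (-1) rfl (le_refl 0)
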